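-- pv_equiv track=rewrite | github.com/MrBrantCode/unitest_baseline | mut_generate/mist_train_taco/taco_11677/solution.py | min_hand_usage
-- ===== SOURCE A (Python) =====
-- import math
--
-- def min_hand_usage(n, m, x, keyboard, text):
--     def shift_key_test(arr, dictionary, distance, row, column):
--         arr_dict = {}
--         if dictionary.get('S') is not None:
--             for (a, b) in dictionary.get('S'):
--                 upper_limit = b - distance
--                 lower_limit = b + distance
--                 if upper_limit < 0:
--                     upper_limit = 0
--                 if lower_limit >= row:
--                     lower_limit = row - 1
--                 (left, right) = (a - 1, a)
--                 (access_right, access_left) = (1, 1)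
--                 while True:
--                     if math.sqrt((right - a) ** 2 + (upper_limit - b) ** 2) <= distance and right < column and access_right:
--                         if arr_dict.get(arr[upper_limit][right]) is None:
--                             arr_dict[arr[upper_limit][right]] = upper_limit
--                     else:
--                         access_right = 0
--                     if math.sqrt((left - a) ** 2 + (upper_limit - b) ** 2) <= distance and left >= 0 and access_left:
--                         if arr_dict.get(arr[upper_limit][left]) is None:
--                             arr_dict[arr[upper_limit][left]] = upper_limit
--                     else:
--                         access_left = 0
--                     right += 1
--                     left -= 1
--                     if not access_left and (not access_right):
--                         (access_left, access_right) = (1, 1)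
--                         (left, right) = (a - 1, a)
--                         upper_limit += 1
--                     if upper_limit > lower_limit:
--                         break
--         return arr_dict
--
--     keyboard_dict = dict()
--     for i in range(n):
--         for j in range(m):
--             if keyboard_dict.get(keyboard[i][j]) is not None:
--                 keyboard_dict[keyboard[i][j]].append((j, i))
--             else:
--                 keyboard_dict[keyboard[i][j]] = [(j, i)]
--
--     hand = 0
--     shift_dict = shift_key_test(keyboard, keyboard_dict, x, n, m)
--
--     for char in text:
--         if keyboard_dict.get(char.lower()) is not None:
--             if 'A' <= char <= 'Z':
--                 if shift_dict.get('S') is not None: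
--                     if shift_dict.get(char.lower()) is None:
--                         hand += 1
--                 else:
--                     return -1
--         else:
--             return -1
--
--     return hand
-- ===== SOURCE B (Python) =====
-- import math
--
-- def min_hand_usage(n, m, x, keyboard, text):
--     # one row-major pass collecting the key set and the Shift positions
--     keys = set()
--     shifts = []
--     for i, row in zip(range(n), keyboard):
--         for j, key in zip(range(m), row):
--             keys.add(key)
--             if key == 'S':
--                 shifts.append((j, i))
--     # flat full-grid distance test instead of A's diamond-spiral scan
--     reachable = set()
--     for (a, b) in shifts:
--         for i, row in zip(range(n), keyboard):
--             for j, key in zip(range(m), row):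
--                 if math.sqrt((j - a) ** 2 + (i - b) ** 2) <= x:
--                     reachable.add(key)
--     hand = 0
--     for ch in text:
--         if ch.lower() not in keys:
--             return -1
--         if 'A' <= ch <= 'Z':
--             if 'S' not in reachable:
--                 return -1
--             if ch.lower() not in reachable:
--                 hand += 1
--     return hand
-- ===== Notes on version B (the rewrite author's own statement) =====
-- stated objective: simpler
-- what changed: B replaces A's diamond-spiral scan with left/right access flags and row clamping (shift_key_test) by a flat full-grid distance test collecting one reachable set, and replaces the positions dict by a key set plus an explicit list of Shift positions gathered in one zip/enumerate pass.
import Mathlib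
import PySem

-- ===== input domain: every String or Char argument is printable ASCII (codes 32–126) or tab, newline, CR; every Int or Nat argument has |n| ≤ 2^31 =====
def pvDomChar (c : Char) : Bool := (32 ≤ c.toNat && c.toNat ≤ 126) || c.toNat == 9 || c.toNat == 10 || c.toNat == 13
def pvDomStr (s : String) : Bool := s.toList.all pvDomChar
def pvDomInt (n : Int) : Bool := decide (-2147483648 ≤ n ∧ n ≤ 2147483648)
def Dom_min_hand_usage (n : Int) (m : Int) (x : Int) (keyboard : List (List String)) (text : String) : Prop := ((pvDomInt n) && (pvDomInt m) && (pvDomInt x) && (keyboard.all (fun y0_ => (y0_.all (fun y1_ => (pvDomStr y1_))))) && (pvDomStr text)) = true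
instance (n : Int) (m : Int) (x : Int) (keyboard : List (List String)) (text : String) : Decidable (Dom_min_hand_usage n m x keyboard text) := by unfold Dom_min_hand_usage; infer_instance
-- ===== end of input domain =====

-- B replaces A's diamond-spiral shift scan (access flags, row clamping) by one flat full-grid
-- distance pass into a reachable set, and the positions dict by a key set + Shift-position list;
-- objective: simpler.  Equivalence is of return values on Pre_ (A mutates nothing observable).

-- ===== PORT A =====

-- keyboard[i][j], total form; Pre_ keeps every index Python actually uses in range
def pvAt (arr : List (List String)) (i j : Int) : String :=
  PySem.List.pyGetD (PySem.List.pyGetD arr i []) j ""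

-- math.sqrt((dx)**2 + (dy)**2) <= x : exact for the integer grid coordinates involved
-- (float sqrt of an exactly-representable square sum compared against an int x)
def pvInReach (x dx dy : Int) : Bool := decide (0 ≤ x ∧ dx * dx + dy * dy ≤ x * x)

-- 'if arr_dict.get(k) is None: arr_dict[k] = v'
def pvDictAdd (d : PySem.Dict String Int) (k : String) (v : Int) : PySem.Dict String Int :=
  match d.get? k with
  | none => d.insert k v
  | some _ => d

-- the 'while True' loop of shift_key_test, one recursive step per iteration
def pvSpiral (arr : List (List String)) (x column : Int) (a b lower : Int)
    (d : PySem.Dict String Int) (u left right : Int) (aL aR : Bool) :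
    PySem.Dict String Int :=
  let cR := pvInReach x (right - a) (u - b) && decide (right < column) && aR
  let d1 := if cR then pvDictAdd d (pvAt arr u right) u else d
  let cL := pvInReach x (left - a) (u - b) && decide (0 ≤ left) && aL
  let d2 := if cL then pvDictAdd d1 (pvAt arr u left) u else d1
  if hk : (cL || cR) = true then
    -- not both flags dead: no reset, row stays
    if lower < u then d2
    else pvSpiral arr x column a b lower d2 u (left - 1) (right + 1) cL cR
  else
    -- both flags dead: reset to next row
    if lower < u + 1 then d2
    else pvSpiral arr x column a b lower d2 (u + 1) (a - 1) a true true
termination_by ((lower + 1 - u).toNat, ((column - right).toNat + (left + 1).toNat))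
decreasing_by
  · apply Prod.Lex.right'
    · omega
    · simp only [cL, cR, Bool.or_eq_true, Bool.and_eq_true, decide_eq_true_eq] at hk
      rcases hk with ⟨⟨_, h⟩, _⟩ | ⟨⟨_, h⟩, _⟩ <;> omega
  · apply Prod.Lex.left; omega

-- shift_key_test
def pvShiftTest (arr : List (List String)) (dict : PySem.Dict String (List (Int × Int)))
    (x n m : Int) : PySem.Dict String Int :=
  match dict.get? "S" with
  | none => PySem.Dict.empty
  | some ps =>
      ps.foldl (fun d p =>
        let a := p.1
        let b := p.2
        let upper := if b - x < 0 then 0 else b - x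
        let lower := if n ≤ b + x then n - 1 else b + x
        pvSpiral arr x m a b lower d upper (a - 1) a true true) PySem.Dict.empty

-- the keyboard_dict build loop
def pvBuild (n m : Int) (keyboard : List (List String)) :
    PySem.Dict String (List (Int × Int)) :=
  (PySem.List.pyRange 0 n 1).foldl (fun d i =>
    (PySem.List.pyRange 0 m 1).foldl (fun d j =>
      match d.get? (pvAt keyboard i j) with
      | some l => d.insert (pvAt keyboard i j) (l ++ [(j, i)])
      | none => d.insert (pvAt keyboard i j) [(j, i)]) d) PySem.Dict.empty

-- 'for char in text: …' with its early returns
def pvTextA (kd : PySem.Dict String (List (Int × Int))) (sd : PySem.Dict String Int)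
    (hand : Int) : List Char → Int
  | [] => hand
  | c :: rest =>
    let lc := String.ofList [PySem.Chars.lowerChar c]
    if (kd.get? lc).isSome then
      if 'A' ≤ c ∧ c ≤ 'Z' then
        if (sd.get? "S").isSome then
          if (sd.get? lc).isSome then pvTextA kd sd hand rest
          else pvTextA kd sd (hand + 1) rest
        else -1
      else pvTextA kd sd hand rest
    else -1

def min_hand_usage (n : Int) (m : Int) (x : Int) (keyboard : List (List String)) (text : String) : Int :=
  let kd := pvBuild n m keyboard
  let sd := pvShiftTest keyboard kd x n m
  pvTextA kd sd 0 text.toList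

-- ===== PORT B =====

-- first pass: key set and Shift positions, via zip(range(n), keyboard) / zip(range(m), row)
def pvCollect (n m : Int) (keyboard : List (List String)) :
    PySem.Set String × List (Int × Int) :=
  ((PySem.List.pyRange 0 n 1).zip keyboard).foldl (fun acc p =>
    ((PySem.List.pyRange 0 m 1).zip p.2).foldl (fun acc q =>
      (PySem.Set.add acc.1 q.2,
       if q.2 == "S" then acc.2 ++ [(q.1, p.1)] else acc.2)) acc)
    (PySem.Set.empty, [])

-- second pass: flat full-grid distance test around every Shift position
def pvReachSet (n m x : Int) (keyboard : List (List String)) (shifts : List (Int × Int)) :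
    PySem.Set String :=
  shifts.foldl (fun s ab =>
    ((PySem.List.pyRange 0 n 1).zip keyboard).foldl (fun s p =>
      ((PySem.List.pyRange 0 m 1).zip p.2).foldl (fun s q =>
        if pvInReach x (q.1 - ab.1) (p.1 - ab.2) then PySem.Set.add s q.2 else s) s) s)
    PySem.Set.empty

def pvTextB (keys reach : PySem.Set String) (hand : Int) : List Char → Int
  | [] => hand
  | c :: rest =>
    let lc := String.ofList [PySem.Chars.lowerChar c]
    if !(PySem.Set.contains keys lc) then -1
    else if 'A' ≤ c ∧ c ≤ 'Z' then
      if !(PySem.Set.contains reach "S") then -1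
      else if !(PySem.Set.contains reach lc) then pvTextB keys reach (hand + 1) rest
      else pvTextB keys reach hand rest
    else pvTextB keys reach hand rest

def min_hand_usage_alt (n : Int) (m : Int) (x : Int) (keyboard : List (List String)) (text : String) : Int :=
  let c := pvCollect n m keyboard
  pvTextB c.1 (pvReachSet n m x keyboard c.2) 0 text.toList

-- ===== PRECONDITION & SPEC =====
-- Pre_ excludes exactly the inputs where Python A raises IndexError: a grid with
-- 0 < n, 0 < m but fewer than n rows, or a row among the first n with fewer than m keys.
def Pre_min_hand_usage (n : Int) (m : Int) (x : Int) (keyboard : List (List String)) (text : String) : Prop :=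
  0 < n → 0 < m → (n ≤ (keyboard.length : Int) ∧
    ∀ row ∈ keyboard.take n.toNat, m ≤ (row.length : Int))
instance (n : Int) (m : Int) (x : Int) (keyboard : List (List String)) (text : String) : Decidable (Pre_min_hand_usage n m x keyboard text) := by unfold Pre_min_hand_usage; infer_instance

def pvWitness_min_hand_usage : Int × Int × Int × List (List String) × String :=
  (2, 2, 1, [["S", "a"], ["b", "c"]], "Ab")

def Spec_min_hand_usage (n : Int) (m : Int) (x : Int) (keyboard : List (List String)) (text : String) (out : Int) : Prop := out = min_hand_usage_alt n m x keyboard text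
instance (n : Int) (m : Int) (x : Int) (keyboard : List (List String)) (text : String) (out : Int) : Decidable (Spec_min_hand_usage n m x keyboard text out) := by unfold Spec_min_hand_usage; infer_instance

-- ===== CLAIM (what is proved, stated in full; the proofs are below) =====
def Claim_equal_min_hand_usage : Prop := ∀ (n : Int) (m : Int) (x : Int) (keyboard : List (List String)) (text : String), Dom_min_hand_usage n m x keyboard text → Pre_min_hand_usage n m x keyboard text → Spec_min_hand_usage n m x keyboard text (min_hand_usage n m x keyboard text)


-- ===== LEMMAS AND PROOFS =====

-- generic: a fold whose every step adds exactly the elements satisfying R preserves-or-extends P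
theorem pvFoldOr {α σ : Type} (P : σ → Prop) (R : α → Prop) (F : σ → α → σ) :
    ∀ (l : List α), (∀ s e, e ∈ l → (P (F s e) ↔ P s ∨ R e)) →
    ∀ s, P (l.foldl F s) ↔ P s ∨ ∃ e ∈ l, R e := by
  intro l
  induction l with
  | nil => intro _ s; simp
  | cons e l ih =>
    intro h s
    rw [List.foldl_cons, ih (fun s e' he => h s e' (List.mem_cons_of_mem _ he)) _,
      h s e List.mem_cons_self]
    simp only [List.mem_cons]
    constructor
    · rintro ((hp | hr) | ⟨e', he', hr⟩)
      · exact Or.inl hp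
      · exact Or.inr ⟨e, Or.inl rfl, hr⟩
      · exact Or.inr ⟨e', Or.inr he', hr⟩
    · rintro (hp | ⟨e', (rfl | he'), hr⟩)
      · exact Or.inl (Or.inl hp)
      · exact Or.inl (Or.inr hr)
      · exact Or.inr ⟨e', he', hr⟩

-- the cell (i, j) of the grid carries key q
def pvHasKeyAt (kb : List (List String)) (q : String) (i j : Int) : Prop :=
  pvAt kb i j = q

-- q is within shift reach of sh = (a, b) somewhere on the n×m grid
def pvReachP (n m x : Int) (kb : List (List String)) (sh : Int × Int) (q : String) : Prop :=
  ∃ i j : Int, 0 ≤ i ∧ i < n ∧ 0 ≤ j ∧ j < m ∧ pvAt kb i j = q ∧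
    0 ≤ x ∧ (j - sh.1) * (j - sh.1) + (i - sh.2) * (i - sh.2) ≤ x * x

-- ---- A side: the keyboard_dict build ----

theorem pvDictAdd_contains (d : PySem.Dict String Int) (k q : String) (v : Int) :
    ((pvDictAdd d k v).contains q = true) ↔ (q = k ∨ d.contains q = true) := by
  unfold pvDictAdd
  cases hg : d.get? k with
  | none => simp [PySem.Dict.contains_insert]
  | some v' =>
    have hc : d.contains k = true := by
      rw [PySem.Dict.contains_eq_isSome_get?, hg]; rfl
    constructor
    · exact fun h => Or.inr h
    · rintro (rfl | h) <;> [exact hc; exact h]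

theorem pvBuild_contains (n m : Int) (kb : List (List String)) (q : String) :
    ((pvBuild n m kb).contains q = true) ↔
      (∃ i j : Int, 0 ≤ i ∧ i < n ∧ 0 ≤ j ∧ j < m ∧ pvHasKeyAt kb q i j) := by
  have hstep : ∀ (i j : Int) (d : PySem.Dict String (List (Int × Int))),
      ((match d.get? (pvAt kb i j) with
        | some l => d.insert (pvAt kb i j) (l ++ [(j, i)])
        | none => d.insert (pvAt kb i j) [(j, i)]).contains q = true) ↔
      (d.contains q = true ∨ pvAt kb i j = q) := by
    intro i j d
    cases d.get? (pvAt kb i j) <;>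
      (simp only [PySem.Dict.contains_insert, Bool.or_eq_true, beq_iff_eq]
       constructor
       · rintro (rfl | h) <;> [exact Or.inr rfl; exact Or.inl h]
       · rintro (h | rfl) <;> [exact Or.inr h; exact Or.inl rfl])
  have hinner : ∀ (i : Int) (d : PySem.Dict String (List (Int × Int))),
      (((PySem.List.pyRange 0 m 1).foldl (fun d j =>
          match d.get? (pvAt kb i j) with
          | some l => d.insert (pvAt kb i j) (l ++ [(j, i)])
          | none => d.insert (pvAt kb i j) [(j, i)]) d).contains q = true) ↔
      (d.contains q = true ∨ ∃ j ∈ PySem.List.pyRange 0 m 1, pvAt kb i j = q) :=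
    fun i d => pvFoldOr (fun d => d.contains q = true) (fun j => pvAt kb i j = q) _
      (PySem.List.pyRange 0 m 1) (fun d j _ => hstep i j d) d
  have houter := pvFoldOr (P := fun d => d.contains q = true)
    (R := fun i => ∃ j ∈ PySem.List.pyRange 0 m 1, pvAt kb i j = q)
    (F := fun d i => (PySem.List.pyRange 0 m 1).foldl (fun d j =>
        match d.get? (pvAt kb i j) with
        | some l => d.insert (pvAt kb i j) (l ++ [(j, i)])
        | none => d.insert (pvAt kb i j) [(j, i)]) d)
    (PySem.List.pyRange 0 n 1) (fun d i _ => hinner i d) PySem.Dict.empty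
  refine Iff.trans houter ?_
  simp only [PySem.Dict.contains_empty, Bool.false_eq_true, false_or,
    PySem.List.mem_pyRange_one, pvHasKeyAt]
  constructor
  · rintro ⟨i, ⟨hi0, hin⟩, j, ⟨hj0, hjm⟩, hat⟩
    exact ⟨i, j, hi0, hin, hj0, hjm, hat⟩
  · rintro ⟨i, j, hi0, hin, hj0, hjm, hat⟩
    exact ⟨i, ⟨hi0, hin⟩, j, ⟨hj0, hjm⟩, hat⟩

theorem pvBuild_mem_S (n m : Int) (kb : List (List String)) (p : Int × Int) :
    (p ∈ (pvBuild n m kb).getD "S" []) ↔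
      (∃ i j : Int, 0 ≤ i ∧ i < n ∧ 0 ≤ j ∧ j < m ∧ pvHasKeyAt kb "S" i j ∧ p = (j, i)) := by
  have hstep : ∀ (i j : Int) (d : PySem.Dict String (List (Int × Int))),
      (p ∈ (match d.get? (pvAt kb i j) with
        | some l => d.insert (pvAt kb i j) (l ++ [(j, i)])
        | none => d.insert (pvAt kb i j) [(j, i)]).getD "S" []) ↔
      (p ∈ d.getD "S" [] ∨ (pvAt kb i j = "S" ∧ p = (j, i))) := by
    intro i j d
    by_cases hS : pvAt kb i j = "S"
    · rw [hS]
      cases hg : d.get? "S" with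
      | none =>
        have hd : d.getD "S" [] = [] := by
          rw [PySem.Dict.getD_eq_get?_getD, hg]; rfl
        simp [PySem.Dict.getD_insert, hd]
      | some l =>
        have hd : d.getD "S" [] = l := by
          rw [PySem.Dict.getD_eq_get?_getD, hg]; rfl
        simp [PySem.Dict.getD_insert, hd]
    · cases hg : d.get? (pvAt kb i j) <;>
        simp [PySem.Dict.getD_insert, Ne.symm hS, hS]
  have hinner : ∀ (i : Int) (d : PySem.Dict String (List (Int × Int))),
      (p ∈ ((PySem.List.pyRange 0 m 1).foldl (fun d j =>
          match d.get? (pvAt kb i j) with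
          | some l => d.insert (pvAt kb i j) (l ++ [(j, i)])
          | none => d.insert (pvAt kb i j) [(j, i)]) d).getD "S" []) ↔
      (p ∈ d.getD "S" [] ∨ ∃ j ∈ PySem.List.pyRange 0 m 1, pvAt kb i j = "S" ∧ p = (j, i)) :=
    fun i d => pvFoldOr (fun d => p ∈ d.getD "S" [])
      (fun j => pvAt kb i j = "S" ∧ p = (j, i)) _
      (PySem.List.pyRange 0 m 1) (fun d j _ => hstep i j d) d
  have houter := pvFoldOr (P := fun d => p ∈ d.getD "S" [])
    (R := fun i => ∃ j ∈ PySem.List.pyRange 0 m 1, pvAt kb i j = "S" ∧ p = (j, i))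
    (F := fun d i => (PySem.List.pyRange 0 m 1).foldl (fun d j =>
        match d.get? (pvAt kb i j) with
        | some l => d.insert (pvAt kb i j) (l ++ [(j, i)])
        | none => d.insert (pvAt kb i j) [(j, i)]) d)
    (PySem.List.pyRange 0 n 1) (fun d i _ => hinner i d) PySem.Dict.empty
  refine Iff.trans houter ?_
  simp only [PySem.Dict.getD_empty, List.not_mem_nil, false_or,
    PySem.List.mem_pyRange_one, pvHasKeyAt]
  constructor
  · rintro ⟨i, ⟨hi0, hin⟩, j, ⟨hj0, hjm⟩, hat, hp⟩
    exact ⟨i, j, hi0, hin, hj0, hjm, hat, hp⟩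
  · rintro ⟨i, j, hi0, hin, hj0, hjm, hat, hp⟩
    exact ⟨i, ⟨hi0, hin⟩, j, ⟨hj0, hjm⟩, hat, hp⟩

-- ---- A side: the spiral scan ----

theorem pvSpiral_of_neg (arr : List (List String)) (x col a b lower : Int) (hx : x < 0) :
    ∀ (d : PySem.Dict String Int) (u left right : Int) (aL aR : Bool),
      pvSpiral arr x col a b lower d u left right aL aR = d := by
  intro d u left right aL aR
  have hre : ∀ dx dy : Int, pvInReach x dx dy = false := by
    intro dx dy; simp only [pvInReach, decide_eq_false_iff_not]; omega
  induction d, u, left, right, aL, aR using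
    pvSpiral.induct arr x col a b lower with
  | case1 d u left right aL aR cR cL hcond hlt =>
    simp only [cL, cR, hre, Bool.false_and, Bool.or_self] at hcond
    cases hcond
  | case2 d u left right aL aR cR d1 cL d2 hcond hnlt ih =>
    simp only [cL, cR, hre, Bool.false_and, Bool.or_self] at hcond
    cases hcond
  | case3 d u left right aL aR cR cL hcond hlt =>
    rw [pvSpiral]
    simp only [hre, Bool.false_and, Bool.or_self, Bool.false_eq_true, dite_false]
    rw [if_pos hlt]
    simp
  | case4 d u left right aL aR cR d1 cL d2 hcond hnlt ih =>
    rw [pvSpiral]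
    simp only [cR, cL, d1, d2, hre, Bool.false_and, Bool.or_self, Bool.false_eq_true,
      dite_false] at ih ⊢
    rw [if_neg hnlt]
    simpa using ih

-- the two half-row scans, as predicates on the remaining frontier
def pvBR (arr : List (List String)) (x col a b : Int) (q : String)
    (u right : Int) (aR : Bool) : Prop :=
  aR = true ∧ ∃ c : Int, right ≤ c ∧ c < col ∧
    0 ≤ x ∧ (c - a) * (c - a) + (u - b) * (u - b) ≤ x * x ∧ pvAt arr u c = q

def pvBL (arr : List (List String)) (x col a b : Int) (q : String)
    (u left : Int) (aL : Bool) : Prop :=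
  aL = true ∧ ∃ c : Int, c ≤ left ∧ 0 ≤ c ∧
    0 ≤ x ∧ (c - a) * (c - a) + (u - b) * (u - b) ≤ x * x ∧ pvAt arr u c = q

-- a full row r, and all rows strictly below u
def pvBRow (arr : List (List String)) (x col a b : Int) (q : String) (r : Int) : Prop :=
  ∃ c : Int, 0 ≤ c ∧ c < col ∧
    0 ≤ x ∧ (c - a) * (c - a) + (r - b) * (r - b) ≤ x * x ∧ pvAt arr r c = q

def pvBRows (arr : List (List String)) (x col a b lower : Int) (q : String) (u : Int) : Prop :=
  ∃ r : Int, u < r ∧ r ≤ lower ∧ pvBRow arr x col a b q r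

theorem pvBR_split (arr : List (List String)) (x col a b : Int) (q : String)
    (u right : Int) (aR : Bool) (har : a ≤ right) :
    pvBR arr x col a b q u right aR ↔
      ((pvInReach x (right - a) (u - b) && decide (right < col) && aR) = true ∧ pvAt arr u right = q) ∨
      pvBR arr x col a b q u (right + 1)
        (pvInReach x (right - a) (u - b) && decide (right < col) && aR) := by
  simp only [pvBR, pvInReach, Bool.and_eq_true, decide_eq_true_eq]
  constructor
  · rintro ⟨haR, c, hrc, hcol, hx0, hsq, hat⟩
    rcases eq_or_lt_of_le hrc with rfl | hlt
    · exact Or.inl ⟨⟨⟨⟨hx0, hsq⟩, hcol⟩, haR⟩, hat⟩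
    · have hmono : (right - a) * (right - a) + (u - b) * (u - b) ≤ x * x := by
        nlinarith [mul_nonneg (by omega : (0:Int) ≤ c - right)
          (by omega : (0:Int) ≤ c + right - 2 * a)]
      exact Or.inr ⟨⟨⟨⟨hx0, hmono⟩, by omega⟩, haR⟩, c, by omega, hcol, hx0, hsq, hat⟩
  · rintro (⟨⟨⟨⟨hx0, hsq⟩, hcol⟩, haR⟩, hat⟩ | ⟨⟨⟨⟨hx0, _⟩, _⟩, haR⟩, c, hrc, hcol, _, hsq, hat⟩)
    · exact ⟨haR, right, le_refl _, hcol, hx0, hsq, hat⟩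
    · exact ⟨haR, c, by omega, hcol, hx0, hsq, hat⟩

theorem pvBL_split (arr : List (List String)) (x col a b : Int) (q : String)
    (u left : Int) (aL : Bool) (hla : left < a) :
    pvBL arr x col a b q u left aL ↔
      ((pvInReach x (left - a) (u - b) && decide (0 ≤ left) && aL) = true ∧ pvAt arr u left = q) ∨
      pvBL arr x col a b q u (left - 1)
        (pvInReach x (left - a) (u - b) && decide (0 ≤ left) && aL) := by
  simp only [pvBL, pvInReach, Bool.and_eq_true, decide_eq_true_eq]
  constructor
  · rintro ⟨haL, c, hcl, hc0, hx0, hsq, hat⟩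
    rcases eq_or_lt_of_le hcl with rfl | hlt
    · exact Or.inl ⟨⟨⟨⟨hx0, hsq⟩, hc0⟩, haL⟩, hat⟩
    · have hmono : (left - a) * (left - a) + (u - b) * (u - b) ≤ x * x := by
        nlinarith [mul_nonneg (by omega : (0:Int) ≤ left - c)
          (by omega : (0:Int) ≤ 2 * a - left - c)]
      exact Or.inr ⟨⟨⟨⟨hx0, hmono⟩, by omega⟩, haL⟩, c, by omega, hc0, hx0, hsq, hat⟩
  · rintro (⟨⟨⟨⟨hx0, hsq⟩, hc0⟩, haL⟩, hat⟩ | ⟨⟨⟨⟨hx0, _⟩, _⟩, haL⟩, c, hcl, hc0, _, hsq, hat⟩)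
    · exact ⟨haL, left, le_refl _, hc0, hx0, hsq, hat⟩
    · exact ⟨haL, c, by omega, hc0, hx0, hsq, hat⟩

theorem pvBRow_eq (arr : List (List String)) (x col a b : Int) (q : String) (r : Int)
    (ha : 0 ≤ a) (hac : a < col) :
    pvBRow arr x col a b q r ↔
      (pvBR arr x col a b q r a true ∨ pvBL arr x col a b q r (a - 1) true) := by
  simp only [pvBRow, pvBR, pvBL, true_and]
  constructor
  · rintro ⟨c, hc0, hcol, hx0, hsq, hat⟩
    rcases (show a ≤ c ∨ c < a by omega) with hac' | hca
    · exact Or.inl ⟨c, hac', hcol, hx0, hsq, hat⟩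
    · exact Or.inr ⟨c, by omega, hc0, hx0, hsq, hat⟩
  · rintro (⟨c, hac', hcol, hx0, hsq, hat⟩ | ⟨c, hca, hc0, hx0, hsq, hat⟩)
    · exact ⟨c, by omega, hcol, hx0, hsq, hat⟩
    · exact ⟨c, hc0, by omega, hx0, hsq, hat⟩

theorem pvBR_false (arr : List (List String)) (x col a b : Int) (q : String) (u r : Int) :
    ¬ pvBR arr x col a b q u r false := by simp [pvBR]

theorem pvBL_false (arr : List (List String)) (x col a b : Int) (q : String) (u l : Int) :
    ¬ pvBL arr x col a b q u l false := by simp [pvBL]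

theorem pvBRows_step (arr : List (List String)) (x col a b lower : Int) (q : String)
    (u : Int) (hul : u < lower) :
    pvBRows arr x col a b lower q u ↔
      (pvBRow arr x col a b q (u + 1) ∨ pvBRows arr x col a b lower q (u + 1)) := by
  unfold pvBRows
  constructor
  · rintro ⟨r, h1, h2, h3⟩
    rcases (show r = u + 1 ∨ u + 1 < r by omega) with rfl | hlt
    · exact Or.inl h3
    · exact Or.inr ⟨r, hlt, h2, h3⟩
  · rintro (h | ⟨r, h1, h2, h3⟩)
    · exact ⟨u + 1, by omega, by omega, h⟩
    · exact ⟨r, by omega, h2, h3⟩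

theorem pvBRows_last (arr : List (List String)) (x col a b lower : Int) (q : String) :
    ¬ pvBRows arr x col a b lower q lower := by
  rintro ⟨r, h1, h2, _⟩; omega

-- membership in the two accumulator updates of one spiral step
theorem pvSpiralStep_mem (arr : List (List String)) (x col a b : Int) (q : String)
    (d : PySem.Dict String Int) (u left right : Int)
    (cL cR : Bool) :
    (((if cL then pvDictAdd (if cR then pvDictAdd d (pvAt arr u right) u else d) (pvAt arr u left) u
        else (if cR then pvDictAdd d (pvAt arr u right) u else d)).contains q) = true) ↔
      ((cL = true ∧ pvAt arr u left = q) ∨ (cR = true ∧ pvAt arr u right = q) ∨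
        d.contains q = true) := by
  cases cL <;> cases cR <;> simp [pvDictAdd_contains] <;> tauto

theorem pvSpiral_contains (arr : List (List String)) (x col a b lower : Int) (q : String)
    (ha : 0 ≤ a) (hac : a < col) :
    ∀ (d : PySem.Dict String Int) (u left right : Int) (aL aR : Bool),
      a ≤ right → left < a → u ≤ lower →
      ((pvSpiral arr x col a b lower d u left right aL aR).contains q = true ↔
        d.contains q = true ∨ pvBR arr x col a b q u right aR ∨
        pvBL arr x col a b q u left aL ∨ pvBRows arr x col a b lower q u) := by
  intro d u left right aL aR
  induction d, u, left, right, aL, aR using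
    pvSpiral.induct arr x col a b lower with
  | case1 d u left right aL aR cR cL hcond hlt =>
    intro _ _ hul; exfalso; omega
  | case2 d u left right aL aR cR d1 cL d2 hcond hnlt ih =>
    intro har hla hul
    simp only [cR, d1, cL, d2, dite_eq_ite] at ih hcond
    rw [pvSpiral, dif_pos hcond, if_neg hnlt,
      ih (by omega) (by omega) hul,
      pvSpiralStep_mem arr x col a b q d u left right,
      pvBR_split arr x col a b q u right aR har,
      pvBL_split arr x col a b q u left aL hla]
    tauto
  | case3 d u left right aL aR cR cL hcond hlt =>
    intro har hla hul
    simp only [cR, cL] at hcond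
    have hcc := hcond
    simp only [Bool.or_eq_true, not_or, Bool.not_eq_true] at hcc
    rw [pvSpiral, dif_neg hcond, if_pos hlt,
      pvSpiralStep_mem arr x col a b q d u left right,
      pvBR_split arr x col a b q u right aR har,
      pvBL_split arr x col a b q u left aL hla,
      hcc.1, hcc.2]
    have hrows : ¬ pvBRows arr x col a b lower q u := by
      have : u = lower := by omega
      rw [this]; exact pvBRows_last arr x col a b lower q
    have h1 := pvBR_false arr x col a b q u (right + 1)
    have h2 := pvBL_false arr x col a b q u (left - 1)
    simp only [Bool.false_eq_true, false_and, false_or, or_false,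
      iff_false_intro h1, iff_false_intro h2, iff_false_intro hrows]
  | case4 d u left right aL aR cR d1 cL d2 hcond hnlt ih =>
    intro har hla hul
    simp only [cR, d1, cL, d2, dite_eq_ite] at ih hcond
    have hcc := hcond
    simp only [Bool.or_eq_true, not_or, Bool.not_eq_true] at hcc
    rw [pvSpiral, dif_neg hcond, if_neg hnlt,
      ih (le_refl a) (by omega) (by omega),
      pvSpiralStep_mem arr x col a b q d u left right,
      pvBR_split arr x col a b q u right aR har,
      pvBL_split arr x col a b q u left aL hla,
      hcc.1, hcc.2,
      pvBRows_step arr x col a b lower q u (by omega)]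
    have hrow := pvBRow_eq arr x col a b q (u + 1) ha hac
    have h1 := pvBR_false arr x col a b q u (right + 1)
    have h2 := pvBL_false arr x col a b q u (left - 1)
    simp only [Bool.false_eq_true, false_and, false_or, or_false,
      iff_false_intro h1, iff_false_intro h2]
    rw [hrow]
    simp only [or_assoc]

-- one whole shift: the spiral from its initial state reaches exactly pvReachP
theorem pvShiftStep_contains (arr : List (List String)) (n m x : Int) (a b : Int) (q : String)
    (ha : 0 ≤ a) (ham : a < m) (hb : 0 ≤ b) (hbn : b < n)
    (d : PySem.Dict String Int) :
    ((pvSpiral arr x m a b (if n ≤ b + x then n - 1 else b + x) d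
        (if b - x < 0 then 0 else b - x) (a - 1) a true true).contains q = true) ↔
      (d.contains q = true ∨ pvReachP n m x arr (a, b) q) := by
  rcases (show x < 0 ∨ 0 ≤ x by omega) with hx | hx
  · rw [pvSpiral_of_neg arr x m a b _ hx]
    have : ¬ pvReachP n m x arr (a, b) q := by
      rintro ⟨i, j, _, _, _, _, _, hx0, _⟩; omega
    tauto
  · have hul : (if b - x < 0 then 0 else b - x) ≤ (if n ≤ b + x then n - 1 else b + x) := by
      split_ifs <;> omega
    rw [pvSpiral_contains arr x m a b _ q ha ham d _ _ _ _ _ (le_refl a) (by omega) hul]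
    have hrow := pvBRow_eq arr x m a b q (if b - x < 0 then 0 else b - x) ha ham
    have hrows : (pvBRow arr x m a b q (if b - x < 0 then 0 else b - x) ∨
        pvBRows arr x m a b (if n ≤ b + x then n - 1 else b + x) q
          (if b - x < 0 then 0 else b - x)) ↔ pvReachP n m x arr (a, b) q := by
      constructor
      · rintro (⟨c, hc0, hcm, hx0, hsq, hat⟩ |
               ⟨r, hr1, hr2, c, hc0, hcm, hx0, hsq, hat⟩)
        · refine ⟨_, c, ?_, ?_, hc0, hcm, hat, hx0, hsq⟩ <;> split_ifs <;> omega
        · refine ⟨r, c, ?_, ?_, hc0, hcm, hat, hx0, hsq⟩ <;>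
            revert hr1 hr2 <;> split_ifs <;> intros <;> omega
      · rintro ⟨i, j, hi0, hin, hj0, hjm, hat, hx0, hsq⟩
        have hvert : (i - b) * (i - b) ≤ x * x := by nlinarith [mul_self_nonneg (j - a)]
        have hlo : b - x ≤ i := by nlinarith [sq_nonneg (i - b + x)]
        have hhi : i ≤ b + x := by nlinarith [sq_nonneg (i - b - x)]
        rcases (show i = (if b - x < 0 then 0 else b - x) ∨
            (if b - x < 0 then 0 else b - x) < i by split_ifs <;> omega) with hieq | hilt
        · exact Or.inl ⟨j, hj0, hjm, hx0, by rw [← hieq]; exact hsq, by rw [← hieq]; exact hat⟩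
        · exact Or.inr ⟨i, hilt, by split_ifs <;> omega, j, hj0, hjm, hx0, hsq, hat⟩
    tauto
  

-- ---- B side ----

theorem pvZip_mem {α : Type} (n : Int) (xs : List α) (p : Int × α) :
    p ∈ (PySem.List.pyRange 0 n 1).zip xs ↔
      ∃ (k : Nat) (_ : k < xs.length), (k : Int) < n ∧ p = ((k : Int), xs[k]) := by
  have hz : ∀ {α : Type} (xs : List α) (a b : Int),
      (PySem.List.pyRange a b 1).zip xs = PySem.List.enumerate (xs.take (b - a).toNat) a := by
    intro α xs
    induction xs with
    | nil => intro a b; simp [List.zip_nil_right, PySem.List.enumerate_nil]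
    | cons y ys ih =>
      intro a b
      rcases (show b ≤ a ∨ a < b by omega) with hba | hab
      · rw [PySem.List.pyRange_one_eq_nil hba]
        simp [show (b - a).toNat = 0 by omega, PySem.List.enumerate]
      · rw [PySem.List.pyRange_one_cons hab]
        have hk : (b - a).toNat = (b - (a + 1)).toNat + 1 := by omega
        rw [hk]
        simp only [List.take_succ_cons, List.zip_cons_cons, PySem.List.enumerate_cons, ih]
  rw [hz xs 0 n, PySem.List.mem_enumerate_iff]
  constructor
  · rintro ⟨k, hk, rfl⟩
    have hlen : (List.take (n - 0).toNat xs).length = min (n - 0).toNat xs.length := by simp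
    rw [hlen] at hk
    refine ⟨k, by omega, by omega, ?_⟩
    simp [List.getElem_take]
  · rintro ⟨k, hk, hkn, rfl⟩
    refine ⟨k, by simp; omega, ?_⟩
    simp [List.getElem_take]

theorem pvCollect_eq (n m : Int) (kb : List (List String)) :
    pvCollect n m kb =
      (((PySem.List.pyRange 0 n 1).zip kb).foldl (fun s p =>
          ((PySem.List.pyRange 0 m 1).zip p.2).foldl (fun s q => PySem.Set.add s q.2) s)
        PySem.Set.empty,
       ((PySem.List.pyRange 0 n 1).zip kb).foldl (fun l p =>
          ((PySem.List.pyRange 0 m 1).zip p.2).foldl (fun l q =>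
            if q.2 == "S" then l ++ [(q.1, p.1)] else l) l)
        []) := by
  unfold pvCollect
  have hstep : (fun (acc : PySem.Set String × List (Int × Int)) (p : Int × List String) =>
      ((PySem.List.pyRange 0 m 1).zip p.2).foldl (fun acc q =>
        (PySem.Set.add acc.1 q.2, if q.2 == "S" then acc.2 ++ [(q.1, p.1)] else acc.2)) acc)
    = (fun acc p =>
      (((PySem.List.pyRange 0 m 1).zip p.2).foldl (fun s q => PySem.Set.add s q.2) acc.1,
       ((PySem.List.pyRange 0 m 1).zip p.2).foldl (fun l q =>
         if q.2 == "S" then l ++ [(q.1, p.1)] else l) acc.2)) := by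
    funext acc p
    rcases acc with ⟨s, l⟩
    rw [PySem.List.foldl_prod_mk (f := fun s1 (q : Int × String) => PySem.Set.add s1 q.2)
      (g := fun l2 (q : Int × String) => if q.2 == "S" then l2 ++ [(q.1, p.1)] else l2)]
  rw [hstep, PySem.List.foldl_prod_mk
    (f := fun s1 (p : Int × List String) =>
      ((PySem.List.pyRange 0 m 1).zip p.2).foldl (fun s q => PySem.Set.add s q.2) s1)
    (g := fun l2 (p : Int × List String) =>
      ((PySem.List.pyRange 0 m 1).zip p.2).foldl (fun l q =>
        if q.2 == "S" then l ++ [(q.1, p.1)] else l) l2)]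

theorem pvBoolEq (a b : Bool) (h : a = true ↔ b = true) : a = b := by
  cases a <;> cases b <;> simp_all

theorem pvAt_eq (kb : List (List String)) (k k' : Nat)
    (h1 : k < kb.length) (h2 : k' < kb[k].length) :
    pvAt kb (k : Int) (k' : Int) = kb[k][k'] := by
  unfold pvAt
  simp only [PySem.List.pyGetD_natCast, List.getD]
  rw [List.getElem?_eq_getElem h1, Option.getD_some, List.getElem?_eq_getElem h2,
    Option.getD_some]

-- translation between B's zip-grid traversal and index-based cell conditions, under Pre_
theorem pvZipCell_iff (n m : Int) (kb : List (List String))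
    (hpre : 0 < n → 0 < m → n ≤ (kb.length : Int) ∧
      ∀ row ∈ kb.take n.toNat, m ≤ (row.length : Int))
    (W : Int → Int → String → Prop) :
    (∃ p ∈ (PySem.List.pyRange 0 n 1).zip kb,
      ∃ c ∈ (PySem.List.pyRange 0 m 1).zip p.2, W p.1 c.1 c.2) ↔
    (∃ i j : Int, 0 ≤ i ∧ i < n ∧ 0 ≤ j ∧ j < m ∧ W i j (pvAt kb i j)) := by
  constructor
  · rintro ⟨p, hp, c, hc, hw⟩
    obtain ⟨k, hk, hkn, rfl⟩ := (pvZip_mem n kb p).mp hp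
    obtain ⟨k', hk', hkm, rfl⟩ := (pvZip_mem m kb[k] c).mp hc
    refine ⟨(k : Int), (k' : Int), by omega, hkn, by omega, hkm, ?_⟩
    rw [pvAt_eq kb k k' hk hk']
    exact hw
  · rintro ⟨i, j, hi0, hin, hj0, hjm, hw⟩
    obtain ⟨hlen, hrows⟩ := hpre (by omega) (by omega)
    have hkl : i.toNat < kb.length := by omega
    have hrow_mem : kb[i.toNat] ∈ kb.take n.toNat := by
      have h1 : i.toNat < n.toNat := by omega
      have h2 : i.toNat < (kb.take n.toNat).length := by
        simp [List.length_take]; omega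
      have : (kb.take n.toNat)[i.toNat] = kb[i.toNat] := List.getElem_take
      rw [← this]
      exact List.getElem_mem h2
    have hrl : m ≤ (kb[i.toNat].length : Int) := hrows _ hrow_mem
    have hk'l : j.toNat < kb[i.toNat].length := by omega
    refine ⟨((i.toNat : Int), kb[i.toNat]), (pvZip_mem n kb _).mpr ⟨i.toNat, hkl, by omega, rfl⟩,
      ((j.toNat : Int), kb[i.toNat][j.toNat]),
      (pvZip_mem m kb[i.toNat] _).mpr ⟨j.toNat, hk'l, by omega, rfl⟩, ?_⟩
    have hat : pvAt kb (i.toNat : Int) (j.toNat : Int) = kb[i.toNat][j.toNat] :=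
      pvAt_eq kb i.toNat j.toNat hkl hk'l
    have hi : (i.toNat : Int) = i := by omega
    have hj : (j.toNat : Int) = j := by omega
    rw [hi, hj] at hat ⊢
    rw [hat] at hw
    exact hw

theorem pvKeysB_mem (n m : Int) (kb : List (List String)) (q : String) :
    q ∈ (pvCollect n m kb).1 ↔
      (∃ p ∈ (PySem.List.pyRange 0 n 1).zip kb,
        ∃ c ∈ (PySem.List.pyRange 0 m 1).zip p.2, c.2 = q) := by
  rw [pvCollect_eq]
  have hinner : ∀ (p : Int × List String) (s : PySem.Set String),
      q ∈ ((PySem.List.pyRange 0 m 1).zip p.2).foldl (fun s c => PySem.Set.add s c.2) s ↔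
      q ∈ s ∨ ∃ c ∈ (PySem.List.pyRange 0 m 1).zip p.2, c.2 = q :=
    fun p s => pvFoldOr (fun s => q ∈ s) (fun c : Int × String => c.2 = q) _ _
      (fun s (c : Int × String) _ => by
        show q ∈ PySem.Set.add s c.2 ↔ q ∈ s ∨ c.2 = q
        rw [PySem.Set.mem_add]; exact or_congr_right eq_comm) s
  have houter := pvFoldOr (P := fun s : PySem.Set String => q ∈ s)
    (R := fun p : Int × List String => ∃ c ∈ (PySem.List.pyRange 0 m 1).zip p.2, c.2 = q)
    (F := fun s p => ((PySem.List.pyRange 0 m 1).zip p.2).foldl (fun s c => PySem.Set.add s c.2) s)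
    ((PySem.List.pyRange 0 n 1).zip kb) (fun s p _ => hinner p s) PySem.Set.empty
  refine Iff.trans houter ?_
  simp [PySem.Set.empty]

theorem pvShiftsB_mem (n m : Int) (kb : List (List String)) (p0 : Int × Int) :
    p0 ∈ (pvCollect n m kb).2 ↔
      (∃ p ∈ (PySem.List.pyRange 0 n 1).zip kb,
        ∃ c ∈ (PySem.List.pyRange 0 m 1).zip p.2, c.2 = "S" ∧ p0 = (c.1, p.1)) := by
  rw [pvCollect_eq]
  have hinner : ∀ (p : Int × List String) (l : List (Int × Int)),
      p0 ∈ ((PySem.List.pyRange 0 m 1).zip p.2).foldl (fun l c =>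
          if c.2 == "S" then l ++ [(c.1, p.1)] else l) l ↔
      p0 ∈ l ∨ ∃ c ∈ (PySem.List.pyRange 0 m 1).zip p.2, c.2 = "S" ∧ p0 = (c.1, p.1) :=
    fun p l => pvFoldOr (fun l => p0 ∈ l)
      (fun c : Int × String => c.2 = "S" ∧ p0 = (c.1, p.1)) _ _
      (fun l (c : Int × String) _ => by by_cases hS : c.2 = "S" <;> simp [hS]) l
  have houter := pvFoldOr (P := fun l : List (Int × Int) => p0 ∈ l)
    (R := fun p : Int × List String =>
      ∃ c ∈ (PySem.List.pyRange 0 m 1).zip p.2, c.2 = "S" ∧ p0 = (c.1, p.1))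
    (F := fun l p => ((PySem.List.pyRange 0 m 1).zip p.2).foldl (fun l c =>
      if c.2 == "S" then l ++ [(c.1, p.1)] else l) l)
    ((PySem.List.pyRange 0 n 1).zip kb) (fun l p _ => hinner p l) []
  refine Iff.trans houter ?_
  simp

set_option maxHeartbeats 1000000 in
theorem pvReachSet_mem (n m x : Int) (kb : List (List String))
    (shifts : List (Int × Int)) (q : String) :
    q ∈ pvReachSet n m x kb shifts ↔
      (∃ sh ∈ shifts, ∃ p ∈ (PySem.List.pyRange 0 n 1).zip kb,
        ∃ c ∈ (PySem.List.pyRange 0 m 1).zip p.2,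
          pvInReach x (c.1 - sh.1) (p.1 - sh.2) = true ∧ c.2 = q) := by
  unfold pvReachSet
  have hcell : ∀ (sh : Int × Int) (p : Int × List String) (s : PySem.Set String),
      q ∈ ((PySem.List.pyRange 0 m 1).zip p.2).foldl (fun s c =>
          if pvInReach x (c.1 - sh.1) (p.1 - sh.2) then PySem.Set.add s c.2 else s) s ↔
      q ∈ s ∨ ∃ c ∈ (PySem.List.pyRange 0 m 1).zip p.2,
        pvInReach x (c.1 - sh.1) (p.1 - sh.2) = true ∧ c.2 = q :=
    fun sh p s => pvFoldOr (fun s => q ∈ s)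
      (fun c : Int × String => pvInReach x (c.1 - sh.1) (p.1 - sh.2) = true ∧ c.2 = q) _ _
      (fun s (c : Int × String) _ => by
        by_cases hr : pvInReach x (c.1 - sh.1) (p.1 - sh.2) = true <;>
          simp [hr, PySem.Set.mem_add, eq_comm]) s
  have hrow : ∀ (sh : Int × Int) (s : PySem.Set String),
      q ∈ ((PySem.List.pyRange 0 n 1).zip kb).foldl (fun s p =>
          ((PySem.List.pyRange 0 m 1).zip p.2).foldl (fun s c =>
            if pvInReach x (c.1 - sh.1) (p.1 - sh.2) then PySem.Set.add s c.2 else s) s) s ↔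
      q ∈ s ∨ ∃ p ∈ (PySem.List.pyRange 0 n 1).zip kb,
        ∃ c ∈ (PySem.List.pyRange 0 m 1).zip p.2,
          pvInReach x (c.1 - sh.1) (p.1 - sh.2) = true ∧ c.2 = q :=
    fun sh s => pvFoldOr (fun s => q ∈ s)
      (fun p => ∃ c ∈ (PySem.List.pyRange 0 m 1).zip p.2,
        pvInReach x (c.1 - sh.1) (p.1 - sh.2) = true ∧ c.2 = q) _ _
      (fun s p _ => hcell sh p s) s
  have houter := pvFoldOr (P := fun s : PySem.Set String => q ∈ s)
    (R := fun sh : Int × Int => ∃ p ∈ (PySem.List.pyRange 0 n 1).zip kb,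
      ∃ c ∈ (PySem.List.pyRange 0 m 1).zip p.2,
        pvInReach x (c.1 - sh.1) (p.1 - sh.2) = true ∧ c.2 = q)
    (F := fun s sh => ((PySem.List.pyRange 0 n 1).zip kb).foldl (fun s p =>
      ((PySem.List.pyRange 0 m 1).zip p.2).foldl (fun s c =>
        if pvInReach x (c.1 - sh.1) (p.1 - sh.2) then PySem.Set.add s c.2 else s) s) s)
    shifts (fun s sh _ => hrow sh s) PySem.Set.empty
  refine Iff.trans houter ?_
  simp [PySem.Set.empty]

-- the text loops agree whenever the two key tests and the two reach tests agree
theorem pvText_eq (kd : PySem.Dict String (List (Int × Int))) (sd : PySem.Dict String Int)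
    (keys reach : PySem.Set String)
    (hK : ∀ s : String, (kd.get? s).isSome = PySem.Set.contains keys s)
    (hS : ∀ s : String, (sd.get? s).isSome = PySem.Set.contains reach s) :
    ∀ (cs : List Char) (hand : Int), pvTextA kd sd hand cs = pvTextB keys reach hand cs := by
  intro cs
  induction cs with
  | nil => intro hand; rfl
  | cons c rest ih =>
    intro hand
    simp only [pvTextA, pvTextB, ← hK, ← hS]
    cases h1 : (kd.get? (String.ofList [PySem.Chars.lowerChar c])).isSome <;>
      cases h2 : (sd.get? "S").isSome <;>
        cases h3 : (sd.get? (String.ofList [PySem.Chars.lowerChar c])).isSome <;>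
          by_cases h4 : ('A' ≤ c ∧ c ≤ 'Z') <;>
            simp [h1, h2, h3, h4, ih]

-- ===== VERDICT (by name: the statement is the Claim_ definition above) =====
theorem min_hand_usage_spec : Claim_equal_min_hand_usage := by
  unfold Claim_equal_min_hand_usage
  intro n m x kb text _hdom hpre
  unfold Spec_min_hand_usage min_hand_usage min_hand_usage_alt Pre_min_hand_usage at *
  apply pvText_eq
  · -- the key tests agree
    intro s
    rw [← PySem.Dict.contains_eq_isSome_get?]
    apply pvBoolEq
    rw [PySem.Set.contains_iff]
    refine Iff.trans (pvBuild_contains n m kb s) ?_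
    refine Iff.trans ?_ (pvKeysB_mem n m kb s).symm
    refine Iff.trans ?_ (pvZipCell_iff n m kb hpre (fun i j key => key = s)).symm
    simp only [pvHasKeyAt]
  · -- the shift-reach tests agree
    intro s
    rw [← PySem.Dict.contains_eq_isSome_get?]
    apply pvBoolEq
    rw [PySem.Set.contains_iff, pvReachSet_mem]
    unfold pvShiftTest
    cases hg : (pvBuild n m kb).get? "S" with
    | none =>
      have hnoS : ¬ ∃ i j : Int, 0 ≤ i ∧ i < n ∧ 0 ≤ j ∧ j < m ∧ pvHasKeyAt kb "S" i j := by
        intro h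
        have hcS := (pvBuild_contains n m kb "S").mpr h
        rw [PySem.Dict.contains_eq_isSome_get?, hg] at hcS
        simp at hcS
      constructor
      · intro hfalse
        rw [PySem.Dict.contains_empty] at hfalse; cases hfalse
      · rintro ⟨sh, hsh, _⟩
        exfalso
        obtain ⟨i, j, hi0, hin, hj0, hjm, hS, _⟩ := (pvZipCell_iff n m kb hpre
          (fun i j key => key = "S" ∧ sh = (j, i))).mp ((pvShiftsB_mem n m kb sh).mp hsh)
        exact hnoS ⟨i, j, hi0, hin, hj0, hjm, hS⟩
    | some ps =>
      have hps : ∀ p0 : Int × Int, p0 ∈ ps ↔ ∃ i j : Int, 0 ≤ i ∧ i < n ∧ 0 ≤ j ∧ j < m ∧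
          pvHasKeyAt kb "S" i j ∧ p0 = (j, i) := by
        intro p0
        have hgd : (pvBuild n m kb).getD "S" [] = ps := by
          rw [PySem.Dict.getD_eq_get?_getD, hg]; rfl
        rw [← pvBuild_mem_S n m kb p0, hgd]
      refine Iff.trans (pvFoldOr (P := fun d : PySem.Dict String Int => d.contains s = true)
        (R := fun sh : Int × Int => pvReachP n m x kb sh s)
        (F := fun d (p : Int × Int) =>
          pvSpiral kb x m p.1 p.2 (if n ≤ p.2 + x then n - 1 else p.2 + x) d
            (if p.2 - x < 0 then 0 else p.2 - x) (p.1 - 1) p.1 true true)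
        ps ?_ PySem.Dict.empty) ?_
      · intro d sh hsh
        obtain ⟨i, j, hi0, hin, hj0, hjm, _hat, hpe⟩ := (hps sh).mp hsh
        subst hpe
        exact pvShiftStep_contains kb n m x j i s hj0 hjm hi0 hin d
      · have hsh_iff : ∀ sh : Int × Int, sh ∈ ps ↔ sh ∈ (pvCollect n m kb).2 := by
          intro sh
          rw [hps sh, pvShiftsB_mem n m kb sh,
            pvZipCell_iff n m kb hpre (fun i j key => key = "S" ∧ sh = (j, i))]
          unfold pvHasKeyAt
          constructor
          · rintro ⟨i, j, h1, h2, h3, h4, h5, h6⟩; exact ⟨i, j, h1, h2, h3, h4, h5, h6⟩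
          · rintro ⟨i, j, h1, h2, h3, h4, h5, h6⟩; exact ⟨i, j, h1, h2, h3, h4, h5, h6⟩
        have hreach_iff : ∀ sh : Int × Int,
            ((∃ p ∈ (PySem.List.pyRange 0 n 1).zip kb,
              ∃ c ∈ (PySem.List.pyRange 0 m 1).zip p.2,
                pvInReach x (c.1 - sh.1) (p.1 - sh.2) = true ∧ c.2 = s)
              ↔ pvReachP n m x kb sh s) := by
          intro sh
          rw [pvZipCell_iff n m kb hpre
            (fun i j key => pvInReach x (j - sh.1) (i - sh.2) = true ∧ key = s)]
          unfold pvReachP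
          simp only [pvInReach, decide_eq_true_eq]
          constructor
          · rintro ⟨i, j, h1, h2, h3, h4, ⟨hx0, hsq⟩, hat⟩
            exact ⟨i, j, h1, h2, h3, h4, hat, hx0, hsq⟩
          · rintro ⟨i, j, h1, h2, h3, h4, hat, hx0, hsq⟩
            exact ⟨i, j, h1, h2, h3, h4, ⟨hx0, hsq⟩, hat⟩
        constructor
        · rintro (hfalse | ⟨sh, hsh, hr⟩)
          · rw [PySem.Dict.contains_empty] at hfalse; cases hfalse
          · exact ⟨sh, (hsh_iff sh).mp hsh, (hreach_iff sh).mpr hr⟩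
        · rintro ⟨sh, hsh, hr⟩
          exact Or.inr ⟨sh, (hsh_iff sh).mpr hsh, (hreach_iff sh).mp hr⟩
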